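-- pv_equiv track=rewrite | github.com/AlbertSchmalbach/Programacion | Python/reducir_lista.py | reducir_lista
-- ===== SOURCE A (Python) =====
-- def reducir_lista(lista):
--     repetidos = []
--     v_alto = 0
--     for v in lista:
--         if v not in repetidos:
--             repetidos.append(v)
--     v_alto = max(repetidos)
--     repetidos.remove(v_alto)
--     return repetidos
-- ===== SOURCE B (Python) =====
-- def reducir_lista(lista):
--     m = max(lista)  # same ValueError as A on empty input
--     vistos = set()
--     resultado = []
--     for v in lista:
--         if v not in vistos and v != m:
--             vistos.add(v)
--             resultado.append(v)
--     return resultado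
-- ===== Notes on version B (the rewrite author's own statement) =====
-- stated objective: simpler
-- what changed: A builds a dedup list with a quadratic 'not in' scan, then does a separate max pass and a .remove pass; B computes max(lista) up front and does one dedup-and-filter pass with a hash set, so the max-removal pass and the .remove scan disappear.
import Mathlib
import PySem

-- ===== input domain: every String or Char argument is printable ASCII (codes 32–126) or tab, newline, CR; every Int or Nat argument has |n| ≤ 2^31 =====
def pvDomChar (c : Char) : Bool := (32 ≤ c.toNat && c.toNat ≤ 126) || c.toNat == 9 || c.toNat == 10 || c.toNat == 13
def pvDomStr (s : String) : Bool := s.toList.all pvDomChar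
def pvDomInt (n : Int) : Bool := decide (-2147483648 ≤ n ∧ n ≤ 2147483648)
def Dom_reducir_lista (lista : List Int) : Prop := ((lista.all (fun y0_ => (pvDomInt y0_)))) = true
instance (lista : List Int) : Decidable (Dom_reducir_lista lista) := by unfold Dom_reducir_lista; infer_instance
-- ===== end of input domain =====

-- B replaces A's three passes (quadratic dedup, max pass, .remove pass) by one up-front
-- max pass plus a single set-based dedup pass that filters the max inline (simpler/faster).

-- ===== PORT A =====
-- literal port of A: dedup via 'not in' on the growing list, then max(), then .remove()
def reducir_lista (lista : List Int) : List Int :=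
  let repetidos := lista.foldl
    (fun repetidos v => if repetidos.contains v then repetidos else repetidos ++ [v]) []
  match PySem.List.max? repetidos (fun x => x) with
  | none => []        -- Python raises ValueError here (empty list); excluded by Pre_
  | some v_alto =>
    match PySem.List.remove? repetidos v_alto with
    | none => []      -- unreachable: v_alto ∈ repetidos
    | some r => r

-- ===== PORT B =====
-- literal port of B: m = max(lista), then one pass with a seen-set, appending v only if unseen and v ≠ m
def reducir_lista_alt (lista : List Int) : List Int :=
  match PySem.List.max? lista (fun x => x) with
  | none => []        -- Python raises ValueError here (empty list); excluded by Pre_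
  | some m =>
    (lista.foldl
      (fun (st : PySem.Set Int × List Int) v =>
        if ¬ PySem.Set.contains st.1 v ∧ v ≠ m then (PySem.Set.add st.1 v, st.2 ++ [v]) else st)
      (PySem.Set.empty, [])).2

-- ===== PRECONDITION & SPEC =====
-- Both A and B raise ValueError (max of empty sequence) on the empty list; Pre_ excludes exactly that.
def Pre_reducir_lista (lista : List Int) : Prop := lista ≠ []
instance (lista : List Int) : Decidable (Pre_reducir_lista lista) := by unfold Pre_reducir_lista; infer_instance
def pvWitness_reducir_lista : List Int := [1, 3, 2, 3, 1]

def Spec_reducir_lista (lista : List Int) (out : List Int) : Prop := out = reducir_lista_alt lista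
instance (lista : List Int) (out : List Int) : Decidable (Spec_reducir_lista lista out) := by unfold Spec_reducir_lista; infer_instance

-- ===== CLAIM (what is proved, stated in full; the proofs are below) =====
def Claim_equal_reducir_lista : Prop := ∀ (lista : List Int), Dom_reducir_lista lista → Pre_reducir_lista lista → Spec_reducir_lista lista (reducir_lista lista)

-- ===== LEMMAS AND PROOFS =====

-- A's dedup loop IS set(…) insertion order: its step is definitionally PySem.Set.add
theorem foldA_eq_ofList (l : List Int) :
    l.foldl (fun repetidos v => if repetidos.contains v then repetidos else repetidos ++ [v]) [] =
      PySem.Set.ofList l := rfl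

-- max over the deduped list = max over the original list (same membership, antisymmetry)
theorem max?_ofList_eq (l : List Int) :
    PySem.List.max? (PySem.Set.ofList l) (fun x => x) = PySem.List.max? l (fun x => x) := by
  rcases h : PySem.List.max? l (fun x : Int => x) with _ | m
  · rw [PySem.List.max?_eq_none_iff] at h ⊢
    subst h; rfl
  · rcases h' : PySem.List.max? (PySem.Set.ofList l) (fun x : Int => x) with _ | m'
    · rw [PySem.List.max?_eq_none_iff] at h'
      have hml : m ∈ PySem.Set.ofList l := (PySem.Set.mem_ofList l m).mpr (PySem.List.max?_mem h)
      rw [h'] at hml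
      simp at hml
    · have hm : m ∈ l := PySem.List.max?_mem h
      have hm' : m' ∈ l := (PySem.Set.mem_ofList l m').mp (PySem.List.max?_mem h')
      have h1 := PySem.List.max?_isMax h m' hm'
      have h2 := PySem.List.max?_isMax h' m ((PySem.Set.mem_ofList l m).mpr hm)
      have : m' = m := le_antisymm h1 h2
      rw [this]

-- one step of B's loop from a paired filtered A-state equals the filtered A-step
theorem stepB_eq (m v : Int) (ra : List Int) :
    (if ¬ PySem.Set.contains (ra.filter (fun x => x != m)) v ∧ v ≠ m then
        (PySem.Set.add (ra.filter (fun x => x != m)) v, ra.filter (fun x => x != m) ++ [v])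
      else (ra.filter (fun x => x != m), ra.filter (fun x => x != m))) =
    ((if ra.contains v then ra else ra ++ [v]).filter (fun x => x != m),
     (if ra.contains v then ra else ra ++ [v]).filter (fun x => x != m)) := by
  by_cases hv : v = m
  · subst hv
    by_cases hmem : v ∈ ra <;>
      simp [PySem.Set.contains, List.mem_filter, hmem, List.filter_append]
  · by_cases hmem : v ∈ ra
    · simp [PySem.Set.contains, List.mem_filter, hmem, hv]
    · simp [PySem.Set.contains, PySem.Set.add, List.mem_filter, hmem, hv, List.filter_append]

-- B's loop, started from a paired filtered A-state, tracks A's dedup loop filtered at m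
theorem loopB_tracks_loopA (m : Int) (l : List Int) (ra : List Int) :
    l.foldl
      (fun (st : PySem.Set Int × List Int) v =>
        if ¬ PySem.Set.contains st.1 v ∧ v ≠ m then (PySem.Set.add st.1 v, st.2 ++ [v]) else st)
      (ra.filter (fun x => x != m), ra.filter (fun x => x != m)) =
    ((l.foldl (fun repetidos v => if repetidos.contains v then repetidos else repetidos ++ [v]) ra).filter (fun x => x != m),
     (l.foldl (fun repetidos v => if repetidos.contains v then repetidos else repetidos ++ [v]) ra).filter (fun x => x != m)) := by
  induction l generalizing ra with
  | nil => rfl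
  | cons v t ih =>
    simp only [List.foldl_cons]
    rw [stepB_eq]
    exact ih (if ra.contains v then ra else ra ++ [v])

-- ===== VERDICT (by name: the statement is the Claim_ definition above) =====
theorem reducir_lista_spec : Claim_equal_reducir_lista := by
  intro lista _ hpre
  unfold Spec_reducir_lista
  obtain ⟨m, hm⟩ : ∃ m, PySem.List.max? lista (fun x : Int => x) = some m := by
    rcases h : PySem.List.max? lista (fun x : Int => x) with _ | m
    · exact absurd ((PySem.List.max?_eq_none_iff _ _).mp h) hpre
    · exact ⟨m, rfl⟩
  have hmax' : PySem.List.max? (PySem.Set.ofList lista) (fun x : Int => x) = some m := by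
    rw [max?_ofList_eq]; exact hm
  have hmem : m ∈ PySem.Set.ofList lista := PySem.List.max?_mem hmax'
  have hrem := PySem.List.remove?_eq_some_erase (PySem.Set.ofList lista) m hmem
  have herase := (PySem.Set.nodup_ofList lista).erase_eq_filter m
  have hB := loopB_tracks_loopA m lista []
  simp only [List.filter_nil] at hB
  simp only [reducir_lista, reducir_lista_alt, foldA_eq_ofList, hm, hmax', hrem, herase,
    PySem.Set.empty]
  rw [hB]
  rfl
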